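-- pv_equiv track=rewrite | github.com/DorogAD/checkio | o'reilly/task14_median_of_three.py | median_three
-- ===== SOURCE A (Python) =====
-- from typing import Iterable
--
-- def median_three(els) -> Iterable[int]:
--     new = []
--     for i in range(len(els)):
--         if i == 0 or i == 1:
--             new.append(els[i])
--         else:
--             new.append((els[i] + els[i - 1] + els[i - 2]) // 3)
--     return new
-- ===== SOURCE B (Python) =====
-- def median_three(els):
--     work = list(els)
--     tail = []
--     while len(work) > 2:
--         c = work.pop()
--         tail.append((work[-2] + work[-1] + c) // 3)
--     tail.reverse()
--     return work + tail
-- ===== Notes on version B (the rewrite author's own statement) =====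
-- stated objective: alternative
-- what changed: Replaces A's forward index loop with its i==0/i==1 branch by a back-to-front consumer: a while loop pops the last element off a working copy, pushes the floor-average of the last three onto a stack until only the two pass-through elements remain, then reverses the stack.
import Mathlib
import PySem

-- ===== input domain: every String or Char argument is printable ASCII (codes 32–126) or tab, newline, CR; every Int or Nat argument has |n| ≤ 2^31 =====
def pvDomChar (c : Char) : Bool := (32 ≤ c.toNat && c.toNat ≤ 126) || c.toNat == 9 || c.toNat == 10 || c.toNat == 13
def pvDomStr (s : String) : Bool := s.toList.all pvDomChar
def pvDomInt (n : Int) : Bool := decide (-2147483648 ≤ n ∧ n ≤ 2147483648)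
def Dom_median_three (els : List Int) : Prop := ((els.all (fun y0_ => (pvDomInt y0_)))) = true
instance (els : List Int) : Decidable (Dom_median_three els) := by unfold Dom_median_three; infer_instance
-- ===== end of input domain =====

-- B replaces A's forward index loop and its i==0/i==1 branch by a back-to-front
-- consumer: pop the last element, push the floor-average of the last three onto a
-- stack until two elements remain, then reverse the stack (alternative decomposition).

-- ===== PORT A =====
def median_three (els : List Int) : List Int :=
  (PySem.List.pyRange 0 (els.length : Int) 1).foldl
    (fun new i =>
      new ++ [if i = 0 ∨ i = 1 then PySem.List.pyGetD els i 0
              else PySem.Int.floordiv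
                     (PySem.List.pyGetD els i 0 + PySem.List.pyGetD els (i - 1) 0
                        + PySem.List.pyGetD els (i - 2) 0) 3]) []

-- ===== PORT B =====
-- Source B's while loop: state (work, tail); work.pop() removes the last element
-- (work becomes work.dropLast, the popped value is work[-1]); work[-2]/work[-1]
-- are then read from the shortened list, exactly as in the Python.
def mtLoop (work tail : List Int) : List Int × List Int :=
  if h : 2 < work.length then
    mtLoop work.dropLast
      (tail ++ [PySem.Int.floordiv
        (PySem.List.pyGetD work.dropLast (-2) 0 + PySem.List.pyGetD work.dropLast (-1) 0
           + PySem.List.pyGetD work (-1) 0) 3])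
  else (work, tail)
termination_by work.length
decreasing_by simp; omega

def median_three_alt (els : List Int) : List Int :=
  ((mtLoop els []).1) ++ ((mtLoop els []).2).reverse

-- ===== PRECONDITION & SPEC =====
def Spec_median_three (els : List Int) (out : List Int) : Prop := out = median_three_alt els
instance (els : List Int) (out : List Int) : Decidable (Spec_median_three els out) := by unfold Spec_median_three; infer_instance

-- ===== CLAIM (what is proved, stated in full; the proofs are below) =====
def Claim_equal_median_three : Prop := ∀ (els : List Int), Dom_median_three els → Spec_median_three els (median_three els)

-- ===== LEMMAS AND PROOFS =====

def mtBody (els : List Int) (i : Int) : Int :=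
  if i = 0 ∨ i = 1 then PySem.List.pyGetD els i 0
  else PySem.Int.floordiv
         (PySem.List.pyGetD els i 0 + PySem.List.pyGetD els (i - 1) 0
            + PySem.List.pyGetD els (i - 2) 0) 3

lemma median_three_eq_map (els : List Int) :
    median_three els = (PySem.List.pyRange 0 (els.length : Int) 1).map (mtBody els) := by
  unfold median_three mtBody
  rw [PySem.List.foldl_append_singleton_eq_map]
  simp

lemma pyGetD_dropLast (xs : List Int) (j : Int) (h0 : 0 ≤ j) (h1 : j < (xs.length : Int) - 1) :
    PySem.List.pyGetD xs.dropLast j 0 = PySem.List.pyGetD xs j 0 := by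
  rw [PySem.List.pyGetD_eq_getElem _ _ h0 (by simp; omega),
      PySem.List.pyGetD_eq_getElem _ _ h0 (by omega)]
  simp [List.getElem_dropLast]

lemma map_small (els : List Int) (h : els.length ≤ 2) :
    (PySem.List.pyRange 0 (els.length : Int) 1).map (mtBody els) = els := by
  match els with
  | [] => simp [PySem.List.pyRange_one_eq_nil]
  | [a] =>
      have hr : PySem.List.pyRange 0 (((1 : Nat)) : Int) 1 = [0] := by decide
      show List.map (mtBody [a]) (PySem.List.pyRange 0 (((1 : Nat)) : Int) 1) = [a]
      rw [hr]
      norm_num [mtBody, PySem.List.pyGetD, PySem.List.pyGet?, PySem.List.pyIdx?]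
  | [a, b] =>
      have hr : PySem.List.pyRange 0 (((2 : Nat)) : Int) 1 = [0, 1] := by decide
      show List.map (mtBody [a, b]) (PySem.List.pyRange 0 (((2 : Nat)) : Int) 1) = [a, b]
      rw [hr]
      norm_num [mtBody, PySem.List.pyGetD, PySem.List.pyGet?, PySem.List.pyIdx?]

-- peeling the last index off A's map form, producing exactly B's pushed element
lemma map_step (els : List Int) (h : ¬ els.length ≤ 2) :
    (PySem.List.pyRange 0 (els.length : Int) 1).map (mtBody els)
      = (PySem.List.pyRange 0 (els.dropLast.length : Int) 1).map (mtBody els.dropLast)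
        ++ [PySem.Int.floordiv
              (PySem.List.pyGetD els.dropLast (-2) 0 + PySem.List.pyGetD els.dropLast (-1) 0
                 + PySem.List.pyGetD els (-1) 0) 3] := by
  have hL3 : 3 ≤ els.length := by omega
  have hcast : ((els.length : Nat) : Int) = ((els.length - 1 : Nat) : Int) + 1 := by omega
  rw [hcast, PySem.List.pyRange_one_succ_right (by positivity), List.map_append,
      List.length_dropLast]
  congr 1
  · apply List.map_congr_left
    intro i hi
    rw [PySem.List.mem_pyRange_one] at hi
    obtain ⟨hi0, hi1⟩ := hi
    unfold mtBody
    by_cases h01 : i = 0 ∨ i = 1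
    · rw [if_pos h01, if_pos h01, pyGetD_dropLast els i hi0 (by omega)]
    · rw [if_neg h01, if_neg h01,
          pyGetD_dropLast els i hi0 (by omega),
          pyGetD_dropLast els (i - 1) (by omega) (by omega),
          pyGetD_dropLast els (i - 2) (by omega) (by omega)]
  · simp only [List.map_cons, List.map_nil, mtBody]
    have hne : ¬ (((els.length - 1 : Nat) : Int) = 0 ∨ ((els.length - 1 : Nat) : Int) = 1) := by
      omega
    rw [if_neg hne]
    congr 2
    rw [PySem.List.pyGetD_neg_ofNat els.dropLast 2 0 (by omega) (by simp; omega),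
        PySem.List.pyGetD_neg_ofNat els.dropLast 1 0 (by omega) (by simp; omega),
        PySem.List.pyGetD_neg_ofNat els 1 0 (by omega) (by omega),
        PySem.List.pyGetD_eq_getElem _ _ (by omega) (by omega),
        PySem.List.pyGetD_eq_getElem _ _ (by omega) (by omega),
        PySem.List.pyGetD_eq_getElem _ _ (by omega) (by omega)]
    have e1 : (((els.length - 1 : Nat) : Int)).toNat = els.length - 1 := by omega
    have e2 : (((els.length - 1 : Nat) : Int) - 1).toNat = els.length - 2 := by omega
    have e3 : (((els.length - 1 : Nat) : Int) - 2).toNat = els.length - 3 := by omega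
    simp only [e1, e2, e3, List.getElem_dropLast, List.length_dropLast]
    have f2 : els.length - 1 - 1 = els.length - 2 := by omega
    have f3 : els.length - 1 - 2 = els.length - 3 := by omega
    simp only [f2, f3]
    ring

-- the accumulator tail is only ever appended to
lemma mtLoop_acc (work tail : List Int) :
    mtLoop work tail = ((mtLoop work []).1, tail ++ (mtLoop work []).2) := by
  by_cases h : 2 < work.length
  · rw [mtLoop, dif_pos h, mtLoop_acc work.dropLast]
    conv_rhs => rw [mtLoop, dif_pos h, mtLoop_acc work.dropLast]
    simp
  · rw [mtLoop, dif_neg h]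
    conv_rhs => rw [mtLoop, dif_neg h]
    simp
termination_by work.length
decreasing_by all_goals (simp; omega)

lemma mtLoop_eq_map (work : List Int) :
    (mtLoop work []).1 ++ ((mtLoop work []).2).reverse
      = (PySem.List.pyRange 0 (work.length : Int) 1).map (mtBody work) := by
  by_cases h : 2 < work.length
  · rw [mtLoop, dif_pos h, mtLoop_acc work.dropLast]
    rw [map_step work (by omega)]
    simp only [List.nil_append, List.reverse_cons, List.singleton_append]
    rw [← List.append_assoc, mtLoop_eq_map work.dropLast]
  · rw [mtLoop, dif_neg h]
    simpa using (map_small work (by omega)).symm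
termination_by work.length
decreasing_by simp; omega

-- ===== VERDICT (by name: the statement is the Claim_ definition above) =====
theorem median_three_spec : Claim_equal_median_three := by
  intro els _
  unfold Spec_median_three median_three_alt
  rw [median_three_eq_map, mtLoop_eq_map]
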